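-- pv_equiv track=rewrite | github.com/SSteel2/AdventOfCode | 2024/14/14.py | _quadrant_score
-- ===== SOURCE A (Python) =====
-- def _quadrant_score(robots):
-- 	quadrants = [0 for i in range(4)]
-- 	for robot in robots:
-- 		quadrant = 0
-- 		if robot['position'][0] == 50 or robot['position'][1] == 51:
-- 			continue
-- 		if robot['position'][0] > 50:
-- 			quadrant += 2
-- 		if robot['position'][1] > 51:
-- 			quadrant += 1
-- 		quadrants[quadrant] += 1
-- 	return quadrants[0] * quadrants[1] * quadrants[2] * quadrants[3]
-- ===== SOURCE B (Python) =====
-- def _quadrant_score(robots):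
-- 	tl = sum(1 for r in robots if r['position'][0] < 50 and r['position'][1] < 51)
-- 	tr = sum(1 for r in robots if r['position'][0] < 50 and r['position'][1] > 51)
-- 	bl = sum(1 for r in robots if r['position'][0] > 50 and r['position'][1] < 51)
-- 	br = sum(1 for r in robots if r['position'][0] > 50 and r['position'][1] > 51)
-- 	return tl * tr * bl * br
-- ===== Notes on version B (the rewrite author's own statement) =====
-- stated objective: simpler
-- what changed: Replaces the stateful loop that maintains a 4-slot counter array via a computed quadrant index with four independent filtered counts (strict comparisons reproduce the centre-line exclusion) multiplied together.
import Mathlib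
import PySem

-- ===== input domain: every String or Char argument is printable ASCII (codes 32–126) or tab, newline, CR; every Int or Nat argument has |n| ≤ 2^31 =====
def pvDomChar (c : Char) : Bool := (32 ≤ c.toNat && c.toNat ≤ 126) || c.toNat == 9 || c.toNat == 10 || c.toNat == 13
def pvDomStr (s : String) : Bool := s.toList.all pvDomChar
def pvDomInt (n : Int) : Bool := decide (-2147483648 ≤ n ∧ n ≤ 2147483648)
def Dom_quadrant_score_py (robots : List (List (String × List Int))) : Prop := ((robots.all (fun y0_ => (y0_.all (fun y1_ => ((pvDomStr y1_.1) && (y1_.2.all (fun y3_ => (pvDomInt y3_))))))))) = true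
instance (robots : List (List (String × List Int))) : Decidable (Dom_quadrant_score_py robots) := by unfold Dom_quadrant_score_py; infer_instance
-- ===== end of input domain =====

-- B replaces the stateful 4-slot counter loop by four independent filtered counts; objective: simpler.

-- ===== PORT A =====
-- shared accessors: robot['position'][0] / [1], totalized with defaults (Pre_ guarantees
-- the real accesses succeed; on the excluded short-circuit corner pos[1] is never read in Python)
def pvPosX (r : List (String × List Int)) : Int :=
  PySem.List.pyGetD (PySem.Dict.getD (PySem.Dict.mk r) "position" []) 0 0
def pvPosY (r : List (String × List Int)) : Int :=
  PySem.List.pyGetD (PySem.Dict.getD (PySem.Dict.mk r) "position" []) 1 0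

-- one iteration of A's for-loop over the quadrants list
def pvQsStep (qs : List Int) (r : List (String × List Int)) : List Int :=
  if pvPosX r == 50 || pvPosY r == 51 then qs
  else
    let q : Nat := (if pvPosX r > 50 then 2 else 0) + (if pvPosY r > 51 then 1 else 0)
    qs.set q (qs.getD q 0 + 1)

def quadrant_score_py (robots : List (List (String × List Int))) : Int :=
  let qs := robots.foldl pvQsStep [0, 0, 0, 0]
  qs.getD 0 0 * qs.getD 1 0 * qs.getD 2 0 * qs.getD 3 0

-- ===== PORT B =====
def quadrant_score_py_alt (robots : List (List (String × List Int))) : Int :=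
  let tl : Int := (robots.countP (fun r => pvPosX r < 50 && pvPosY r < 51) : Nat)
  let tr : Int := (robots.countP (fun r => pvPosX r < 50 && 51 < pvPosY r) : Nat)
  let bl : Int := (robots.countP (fun r => 50 < pvPosX r && pvPosY r < 51) : Nat)
  let br : Int := (robots.countP (fun r => 50 < pvPosX r && 51 < pvPosY r) : Nat)
  tl * tr * bl * br

-- ===== PRECONDITION & SPEC =====
-- Pre_ excludes exactly the inputs where the Python raises: a robot without a 'position'
-- entry or with one too short for the subscripts actually evaluated (pos[1] is skipped by
-- short-circuit when pos[0] == 50, so a singleton [50] is still accepted).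
def Pre_quadrant_score_py (robots : List (List (String × List Int))) : Prop :=
  ∀ r ∈ robots,
    2 ≤ (PySem.Dict.getD (PySem.Dict.mk r) "position" []).length ∨
      ((PySem.Dict.getD (PySem.Dict.mk r) "position" []).length = 1 ∧ (PySem.Dict.getD (PySem.Dict.mk r) "position" []).getD 0 0 = 50)
instance (robots : List (List (String × List Int))) : Decidable (Pre_quadrant_score_py robots) := by unfold Pre_quadrant_score_py; infer_instance

def pvWitness_quadrant_score_py : (List (List (String × List Int))) :=
  [[("position", [3, 60])], [("position", [55, 7])], [("position", [50])]]

def Spec_quadrant_score_py (robots : List (List (String × List Int))) (out : Int) : Prop := out = quadrant_score_py_alt robots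
instance (robots : List (List (String × List Int))) (out : Int) : Decidable (Spec_quadrant_score_py robots out) := by unfold Spec_quadrant_score_py; infer_instance

-- ===== CLAIM (what is proved, stated in full; the proofs are below) =====
def Claim_equal_quadrant_score_py : Prop := ∀ (robots : List (List (String × List Int))), Dom_quadrant_score_py robots → Pre_quadrant_score_py robots → Spec_quadrant_score_py robots (quadrant_score_py robots)

-- ===== LEMMAS AND PROOFS =====

-- loop invariant: A's fold over the 4-slot list adds B's four counts slotwise
lemma pv_fold_counts (rs : List (List (String × List Int))) (a b c d : Int) :
    rs.foldl pvQsStep [a, b, c, d] =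
      [a + (rs.countP (fun r => pvPosX r < 50 && pvPosY r < 51) : Nat),
       b + (rs.countP (fun r => pvPosX r < 50 && 51 < pvPosY r) : Nat),
       c + (rs.countP (fun r => 50 < pvPosX r && pvPosY r < 51) : Nat),
       d + (rs.countP (fun r => 50 < pvPosX r && 51 < pvPosY r) : Nat)] := by
  induction rs generalizing a b c d with
  | nil => simp
  | cons r rest ih =>
    simp only [List.foldl_cons, List.countP_cons]
    by_cases hx50 : pvPosX r = 50
    · have h : pvQsStep [a, b, c, d] r = [a, b, c, d] := by
        simp [pvQsStep, hx50]
      rw [h, ih]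
      simp [hx50]
    · by_cases hy51 : pvPosY r = 51
      · have h : pvQsStep [a, b, c, d] r = [a, b, c, d] := by
          simp [pvQsStep, hy51]
        rw [h, ih]
        simp [hy51]
      · by_cases hx : pvPosX r > 50
        · by_cases hy : pvPosY r > 51
          · have h : pvQsStep [a, b, c, d] r = [a, b, c, d + 1] := by
              simp [pvQsStep, hx50, hy51, hx, hy]
            rw [h, ih]
            have hx' : ¬ pvPosX r < 50 := by omega
            have hy' : ¬ pvPosY r < 51 := by omega
            simp [hx, hy, hx', hy']
            ring
          · have hy' : pvPosY r < 51 := by omega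
            have h : pvQsStep [a, b, c, d] r = [a, b, c + 1, d] := by
              simp [pvQsStep, hx50, hy51, hx, hy]
            rw [h, ih]
            have hx' : ¬ pvPosX r < 50 := by omega
            simp [hx, hy, hx', hy']
            ring
        · have hx' : pvPosX r < 50 := by omega
          by_cases hy : pvPosY r > 51
          · have h : pvQsStep [a, b, c, d] r = [a, b + 1, c, d] := by
              simp [pvQsStep, hx50, hy51, hx, hy]
            rw [h, ih]
            have hy' : ¬ pvPosY r < 51 := by omega
            simp [hx, hy, hx', hy']
            ring
          · have hy' : pvPosY r < 51 := by omega
            have h : pvQsStep [a, b, c, d] r = [a + 1, b, c, d] := by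
              simp [pvQsStep, hx50, hy51, hx, hy]
            rw [h, ih]
            simp [hx, hy, hx', hy']
            ring

-- ===== VERDICT (by name: the statement is the Claim_ definition above) =====
theorem quadrant_score_py_spec : Claim_equal_quadrant_score_py := by
  intro robots _ _
  unfold Spec_quadrant_score_py quadrant_score_py quadrant_score_py_alt
  rw [pv_fold_counts]
  simp
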